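-- pv_equiv track=rewrite | github.com/alishalopes87/hb-coding-challenges | link.py | param_count
-- ===== SOURCE A (Python) =====
-- def param_count(link):
--
-- 	count={}
--
-- 	query = link.index("?")
-- 	#need to find actual index of ? to slice on
--
-- 	link_list = link[query+1:]
--
-- 	link_list = link_list.split("=")
--
-- 	#cannot split again on list so iterate over strings in list and split on each
-- 	#append to result list
-- 	result = []
-- 	for link in link_list:
-- 		link = link.split("&")
-- 		result.extend(link)
--
-- 	for param in range(len(result)):
-- 		if param % 2 == 0:
-- 			count[result[param]] = count.get(result[param], 0) + 1
--
-- 	return count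
-- ===== SOURCE B (Python) =====
-- def param_count(link):
--     # One streaming pass: '=' and '&' are uniform token terminators; count a
--     # token when its running index is even. Same ValueError as A when '?' is absent.
--     query = link.index("?")
--     count = {}
--     done = 0
--     tok = []
--     for ch in link[query + 1:]:
--         if ch == '=' or ch == '&':
--             if done % 2 == 0:
--                 t = ''.join(tok)
--                 count[t] = count.get(t, 0) + 1
--             done += 1
--             tok = []
--         else:
--             tok.append(ch)
--     if done % 2 == 0:
--         t = ''.join(tok)
--         count[t] = count.get(t, 0) + 1
--     return count
-- ===== Notes on version B (the rewrite author's own statement) =====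
-- stated objective: alternative
-- what changed: A builds the full token list by splitting on '=' and then on '&' and makes a second indexed pass over even positions; B makes one streaming left-to-right scan treating '=' and '&' uniformly as token terminators, counting a token immediately when its running index is even.
import Mathlib
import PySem

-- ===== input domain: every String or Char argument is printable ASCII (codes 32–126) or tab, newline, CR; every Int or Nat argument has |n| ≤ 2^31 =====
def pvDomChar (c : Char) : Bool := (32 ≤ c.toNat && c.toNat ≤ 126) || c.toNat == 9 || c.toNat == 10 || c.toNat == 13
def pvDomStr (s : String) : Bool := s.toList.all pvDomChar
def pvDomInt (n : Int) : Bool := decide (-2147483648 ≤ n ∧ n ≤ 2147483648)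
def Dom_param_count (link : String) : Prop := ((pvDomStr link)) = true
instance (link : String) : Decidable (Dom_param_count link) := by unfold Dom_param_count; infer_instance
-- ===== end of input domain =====

-- B replaces A's split-on-'=' + split-on-'&' + second even-index pass by ONE streaming scan
-- that treats '=' and '&' uniformly as token terminators (alternative decomposition, same cost).

-- ===== PORT A =====
def param_count (link : String) : List (String × Int) :=
  let count : PySem.Dict String Int := PySem.Dict.empty
  -- link.index("?"): raises ValueError when "?" is absent — excluded by Pre_param_count
  let query : Int := PySem.Str.find link "?"
  let link_list : String := PySem.Str.slice link (some (query + 1)) none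
  -- link_list.split("="): separator is non-empty, so split? is never none
  let link_list2 : List String := (PySem.Str.split? link_list "=").getD []
  let result : List String :=
    link_list2.foldl (fun result l => result ++ (PySem.Str.split? l "&").getD []) []
  let count :=
    (PySem.List.pyRange 0 (PySem.List.len result)).foldl
      (fun count param =>
        if PySem.Int.mod param 2 == 0 then
          let key := PySem.List.pyGetD result param ""
          count.insert key (count.getD key 0 + 1)
        else count)
      count
  count.items

-- ===== PORT B =====
def param_count_alt (link : String) : List (String × Int) :=
  -- link.index("?"): raises ValueError when "?" is absent — excluded by Pre_param_count
  let query : Int := PySem.Str.find link "?"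
  let s : List Char := PySem.List.slice link.toList (some (query + 1)) none
  let st :=
    s.foldl
      (fun (st : PySem.Dict String Int × Int × List Char) ch =>
        let (count, done, tok) := st
        if ch = '=' ∨ ch = '&' then
          let count :=
            if PySem.Int.mod done 2 == 0 then
              let t := String.ofList tok
              count.insert t (count.getD t 0 + 1)
            else count
          (count, done + 1, ([] : List Char))
        else (count, done, tok ++ [ch]))
      (PySem.Dict.empty, 0, [])
  let (count, done, tok) := st
  let count :=
    if PySem.Int.mod done 2 == 0 then
      let t := String.ofList tok
      count.insert t (count.getD t 0 + 1)
    else count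
  count.items

-- ===== PRECONDITION & SPEC =====
-- Pre_ excludes exactly the inputs with no "?", where Python's link.index("?") raises ValueError.
def Pre_param_count (link : String) : Prop := PySem.Str.isIn "?" link = true
instance (link : String) : Decidable (Pre_param_count link) := by unfold Pre_param_count; infer_instance
def pvWitness_param_count : String := "x.org/p?a=1&b=2&a=3"
def Spec_param_count (link : String) (out : List (String × Int)) : Prop := out = param_count_alt link
instance (link : String) (out : List (String × Int)) : Decidable (Spec_param_count link out) := by unfold Spec_param_count; infer_instance

-- ===== CLAIM (what is proved, stated in full; the proofs are below) =====
def Claim_equal_param_count : Prop := ∀ (link : String), Dom_param_count link → Pre_param_count link → Spec_param_count link (param_count link)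

-- ===== LEMMAS AND PROOFS =====

def pvDelim (c : Char) : Bool := c == '=' || c == '&'

/-- Splitting a character list on a Boolean delimiter predicate (Python split semantics). -/
def pvSplitP (p : Char → Bool) : List Char → List (List Char)
  | [] => [[]]
  | a :: rest =>
    if p a then [] :: pvSplitP p rest
    else
      match pvSplitP p rest with
      | t :: ts => (a :: t) :: ts
      | [] => [[a]]

theorem pvSplitP_ne_nil (p : Char → Bool) (s : List Char) : pvSplitP p s ≠ [] := by
  cases s with
  | nil => simp [pvSplitP]
  | cons a rest =>
    simp only [pvSplitP]
    split
    · simp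
    · split <;> simp

def pvMapHead (f : List Char → List Char) : List (List Char) → List (List Char)
  | [] => []
  | t :: ts => f t :: ts

theorem pv_go_single (c : Char) (fuel : Nat) :
    ∀ (l cur : List Char) (acc : List (List Char)), l.length < fuel →
    PySem.Chars.splitOn.go [c] fuel l cur acc
      = acc.reverse ++ pvMapHead (cur.reverse ++ ·) (pvSplitP (· == c) l) := by
  induction fuel with
  | zero => intro l cur acc h; omega
  | succ f ih =>
    intro l cur acc h
    cases l with
    | nil => simp [PySem.Chars.splitOn.go, pvSplitP, pvMapHead]
    | cons a rest =>
      by_cases hac : a = c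
      · subst hac
        have hgo : PySem.Chars.splitOn.go [a] (f + 1) (a :: rest) cur acc
            = PySem.Chars.splitOn.go [a] f rest [] (cur.reverse :: acc) := by
          simp [PySem.Chars.splitOn.go, List.isPrefixOf]
        rw [hgo, ih rest [] _ (by simp at h; omega)]
        cases hs : pvSplitP (· == a) rest with
        | nil => exact absurd hs (pvSplitP_ne_nil _ _)
        | cons t ts => simp [pvSplitP, hs, pvMapHead]
      · have hgo : PySem.Chars.splitOn.go [c] (f + 1) (a :: rest) cur acc
            = PySem.Chars.splitOn.go [c] f rest (a :: cur) acc := by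
          simp [PySem.Chars.splitOn.go, List.isPrefixOf, Ne.symm hac]
        rw [hgo, ih rest (a :: cur) _ (by simp at h; omega)]
        cases hs : pvSplitP (· == c) rest with
        | nil => exact absurd hs (pvSplitP_ne_nil _ _)
        | cons t ts => simp [pvSplitP, hs, hac, pvMapHead]

theorem pv_splitOn_single (c : Char) (s : List Char) :
    PySem.Chars.splitOn s [c] = pvSplitP (· == c) s := by
  unfold PySem.Chars.splitOn
  rw [pv_go_single c (s.length + 1) s [] [] (by omega)]
  cases hs : pvSplitP (· == c) s with
  | nil => exact absurd hs (pvSplitP_ne_nil _ _)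
  | cons t ts => simp [pvMapHead]

theorem pv_flat (s : List Char) :
    (pvSplitP (· == '=') s).flatMap (fun t => pvSplitP (· == '&') t)
      = pvSplitP pvDelim s := by
  induction s with
  | nil => simp [pvSplitP]
  | cons a rest ih =>
    by_cases h1 : a = '='
    · subst h1
      simp [pvSplitP, pvDelim, ih]
    · obtain ⟨t, ts, hts⟩ : ∃ t ts, pvSplitP (· == '=') rest = t :: ts := by
        cases hs : pvSplitP (· == '=') rest with
        | nil => exact absurd hs (pvSplitP_ne_nil _ _)
        | cons t ts => exact ⟨t, ts, rfl⟩
      have ih' : pvSplitP (· == '&') t ++ ts.flatMap (fun t => pvSplitP (· == '&') t)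
          = pvSplitP pvDelim rest := by
        rw [← ih, hts, List.flatMap_cons]
      by_cases h2 : a = '&'
      · subst h2
        simp [pvSplitP, pvDelim, hts, ih']
      · obtain ⟨u, us, hus⟩ : ∃ u us, pvSplitP (· == '&') t = u :: us := by
          cases hs : pvSplitP (· == '&') t with
          | nil => exact absurd hs (pvSplitP_ne_nil _ _)
          | cons u us => exact ⟨u, us, rfl⟩
        have hrest : pvSplitP pvDelim rest
            = u :: (us ++ ts.flatMap (fun t => pvSplitP (· == '&') t)) := by
          rw [← ih', hus, List.cons_append]
        simp [pvSplitP, pvDelim, h1, h2, hts, hus, hrest]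

def pvBump (d : PySem.Dict String Int) (k : String) : PySem.Dict String Int :=
  d.insert k (d.getD k 0 + 1)

/-- Count, left to right, the tokens sitting at even running index (starting at `i`). -/
def pvCountEven : PySem.Dict String Int → Int → List String → PySem.Dict String Int
  | d, _, [] => d
  | d, i, t :: ts => pvCountEven (if PySem.Int.mod i 2 == 0 then pvBump d t else d) (i + 1) ts

theorem pv_A_loop (res : List String) :
    ∀ (n j : Nat) (d : PySem.Dict String Int), j ≤ res.length → res.length - j = n →
    (PySem.List.pyRange (j : Int) (PySem.List.len res)).foldl
      (fun count param =>
        if PySem.Int.mod param 2 == 0 then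
          count.insert (PySem.List.pyGetD res param "")
            (count.getD (PySem.List.pyGetD res param "") 0 + 1)
        else count) d
    = pvCountEven d j (res.drop j) := by
  intro n
  induction n with
  | zero =>
    intro j d hj hn
    have hj' : j = res.length := by omega
    subst hj'
    rw [PySem.List.pyRange_one_eq_nil (by simp [PySem.List.len])]
    simp [pvCountEven]
  | succ n ihn =>
    intro j d hj hn
    have hjlt : j < res.length := by omega
    rw [PySem.List.pyRange_one_cons (by simp [PySem.List.len]; exact_mod_cast hjlt)]
    rw [List.foldl_cons]
    rw [List.drop_eq_getElem_cons hjlt]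
    simp only [PySem.List.pyGetD_natCast, List.getD_eq_getElem?_getD,
      List.getElem?_eq_getElem hjlt, Option.getD_some]
    rw [show ((j : Int) + 1) = ((j + 1 : Nat) : Int) by push_cast; ring]
    rw [ihn (j + 1) _ (by omega) (by omega)]
    rfl

theorem pv_A_loop0 (res : List String) (d : PySem.Dict String Int) :
    (PySem.List.pyRange 0 (PySem.List.len res)).foldl
      (fun count param =>
        if PySem.Int.mod param 2 == 0 then
          count.insert (PySem.List.pyGetD res param "")
            (count.getD (PySem.List.pyGetD res param "") 0 + 1)
        else count) d
    = pvCountEven d 0 res := by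
  have h := pv_A_loop res res.length 0 d (by omega) rfl
  simpa using h

def pvStep : (PySem.Dict String Int × Int × List Char) → Char → (PySem.Dict String Int × Int × List Char) :=
  fun st ch =>
    let (count, done, tok) := st
    if ch = '=' ∨ ch = '&' then
      let count :=
        if PySem.Int.mod done 2 == 0 then
          let t := String.ofList tok
          count.insert t (count.getD t 0 + 1)
        else count
      (count, done + 1, ([] : List Char))
    else (count, done, tok ++ [ch])

def pvFin (st : PySem.Dict String Int × Int × List Char) : PySem.Dict String Int :=
  let (count, done, tok) := st
  if PySem.Int.mod done 2 == 0 then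
    let t := String.ofList tok
    count.insert t (count.getD t 0 + 1)
  else count

theorem pv_B_loop (s : List Char) :
    ∀ (d : PySem.Dict String Int) (i : Int) (cur : List Char),
    pvFin (s.foldl pvStep (d, i, cur))
      = pvCountEven d i ((pvMapHead (cur ++ ·) (pvSplitP pvDelim s)).map String.ofList) := by
  induction s with
  | nil =>
    intro d i cur
    simp [pvFin, pvSplitP, pvMapHead, pvCountEven, pvBump]
  | cons a rest ih =>
    intro d i cur
    obtain ⟨t, ts, hts⟩ : ∃ t ts, pvSplitP pvDelim rest = t :: ts := by
      cases hs : pvSplitP pvDelim rest with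
      | nil => exact absurd hs (pvSplitP_ne_nil _ _)
      | cons t ts => exact ⟨t, ts, rfl⟩
    by_cases h : a = '=' ∨ a = '&'
    · have hstep : pvStep (d, i, cur) a
          = ((if PySem.Int.mod i 2 == 0 then pvBump d (String.ofList cur) else d), i + 1, ([] : List Char)) := by
        simp [pvStep, h, pvBump]
      have hda : pvDelim a = true := by
        rcases h with h | h <;> simp [pvDelim, h]
      rw [List.foldl_cons, hstep, ih]
      simp [pvSplitP, hda, hts, pvMapHead, pvCountEven, List.append_nil]
    · have hstep : pvStep (d, i, cur) a = (d, i, cur ++ [a]) := by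
        simp [pvStep, h]
      have hda : pvDelim a = false := by
        have h1 : ¬ a = '=' := fun hh => h (Or.inl hh)
        have h2 : ¬ a = '&' := fun hh => h (Or.inr hh)
        simp [pvDelim, h1, h2]
      rw [List.foldl_cons, hstep, ih]
      simp [pvSplitP, hda, hts, pvMapHead, List.append_assoc]

theorem pv_flatMap_ofList (ts : List (List Char)) :
    (ts.map String.ofList).flatMap (fun l => (pvSplitP (· == '&') l.toList).map String.ofList)
      = (ts.flatMap (fun t => pvSplitP (· == '&') t)).map String.ofList := by
  induction ts with
  | nil => rfl
  | cons t ts ih => simp [ih]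

theorem pv_split_amp (l : String) :
    (PySem.Str.split? l "&").getD [] = (pvSplitP (· == '&') l.toList).map String.ofList := by
  simp only [PySem.Str.split?, PySem.Chars.split?]
  rw [show ("&".toList) = ['&'] from rfl]
  simp [pv_splitOn_single]

-- ===== VERDICT (by name: the statement is the Claim_ definition above) =====
theorem param_count_spec : Claim_equal_param_count := by
  intro link _ _
  unfold Spec_param_count
  simp only [param_count, param_count_alt]
  rw [show PySem.Str.slice link (some (PySem.Str.find link "?" + 1)) none
      = String.ofList (PySem.List.slice link.toList (some (PySem.Str.find link "?" + 1)) none) from by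
    simp [PySem.Str.slice, PySem.Chars.slice_eq_listSlice]]
  generalize PySem.List.slice link.toList (some (PySem.Str.find link "?" + 1)) none = s
  have hsplit : (PySem.Str.split? (String.ofList s) "=").getD []
      = (pvSplitP (· == '=') s).map String.ofList := by
    simp only [PySem.Str.split?, PySem.Chars.split?]
    simp [pv_splitOn_single, show (("=".toList) : List Char) = ['='] from rfl]
  rw [hsplit]
  simp only [PySem.List.foldl_append_eq_flatMap, List.nil_append]
  simp only [pv_split_amp]
  rw [pv_flatMap_ofList, pv_flat, pv_A_loop0]
  show (pvCountEven PySem.Dict.empty 0 ((pvSplitP pvDelim s).map String.ofList)).items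
      = (pvFin (List.foldl pvStep (PySem.Dict.empty, 0, ([] : List Char)) s)).items
  rw [pv_B_loop s PySem.Dict.empty 0 []]
  obtain ⟨t, ts, hts⟩ : ∃ t ts, pvSplitP pvDelim s = t :: ts := by
    cases hs : pvSplitP pvDelim s with
    | nil => exact absurd hs (pvSplitP_ne_nil _ _)
    | cons t ts => exact ⟨t, ts, rfl⟩
  rw [hts]
  simp [pvMapHead]
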